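-- pv_equiv track=rewrite | github.com/dqii/pgconf-eu-demo | process_repo.py | is_acceptable_file
-- ===== SOURCE A (Python) =====
-- def is_acceptable_file(file_name):
--     ACCEPTABLE_SUFFIXES = [
--         '.py', '.js', '.java', '.rb', '.go', '.rs', '.json', '.yaml', '.yml', '.xml',
--         '.md', '.txt', '.sh', '.sql', '.ts', '.h', '.c', '.cpp', '.hpp', '.php',
--         '.jsx', '.tsx', '.swift', '.kt', '.cs', '.out'
--     ]
--     ACCEPTABLE_FILENAMES = {'Makefile', 'Dockerfile', '.env'}
--     REJECTED_FILENAMES = {'package-lock.json'}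
--
--     if file_name in REJECTED_FILENAMES:
--         return False
--
--     return any(file_name.endswith(suffix) for suffix in ACCEPTABLE_SUFFIXES) or file_name in ACCEPTABLE_FILENAMES
-- ===== SOURCE B (Python) =====
-- ACCEPTABLE_EXTENSIONS = {
--     '.py', '.js', '.java', '.rb', '.go', '.rs', '.json', '.yaml', '.yml', '.xml',
--     '.md', '.txt', '.sh', '.sql', '.ts', '.h', '.c', '.cpp', '.hpp', '.php',
--     '.jsx', '.tsx', '.swift', '.kt', '.cs', '.out'
-- }
-- ACCEPTABLE_FILENAMES = {'Makefile', 'Dockerfile', '.env'}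
-- REJECTED_FILENAMES = {'package-lock.json'}
--
--
-- def is_acceptable_file(file_name):
--     if file_name in REJECTED_FILENAMES:
--         return False
--     head, sep, tail = file_name.rpartition('.')
--     return (sep == '.' and '.' + tail in ACCEPTABLE_EXTENSIONS) \
--         or file_name in ACCEPTABLE_FILENAMES
-- ===== Notes on version B (the rewrite author's own statement) =====
-- stated objective: idiomatic
-- what changed: Replaces A's any() scan of 26 endswith tests with a single rpartition on the last dot extracting the extension, followed by one set membership lookup.
import Mathlib
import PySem

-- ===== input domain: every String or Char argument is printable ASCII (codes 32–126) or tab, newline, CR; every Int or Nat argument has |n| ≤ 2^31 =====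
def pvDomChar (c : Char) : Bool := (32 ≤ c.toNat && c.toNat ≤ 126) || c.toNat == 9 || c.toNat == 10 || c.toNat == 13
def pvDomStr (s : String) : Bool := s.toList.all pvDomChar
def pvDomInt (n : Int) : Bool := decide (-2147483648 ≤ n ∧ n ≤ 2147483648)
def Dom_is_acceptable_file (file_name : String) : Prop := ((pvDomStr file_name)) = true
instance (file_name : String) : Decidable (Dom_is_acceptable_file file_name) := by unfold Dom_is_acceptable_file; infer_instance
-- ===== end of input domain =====

-- B replaces A's scan of 26 endswith tests by extracting the extension after the last dot once and looking it up in a set (objective: idiomatic).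

-- ===== PORT A =====
def is_acceptable_file (file_name : String) : Bool :=
  let ACCEPTABLE_SUFFIXES : List String :=
    [".py", ".js", ".java", ".rb", ".go", ".rs", ".json", ".yaml", ".yml", ".xml",
     ".md", ".txt", ".sh", ".sql", ".ts", ".h", ".c", ".cpp", ".hpp", ".php",
     ".jsx", ".tsx", ".swift", ".kt", ".cs", ".out"]
  let ACCEPTABLE_FILENAMES : PySem.Set String := PySem.Set.ofList ["Makefile", "Dockerfile", ".env"]
  let REJECTED_FILENAMES : PySem.Set String := PySem.Set.ofList ["package-lock.json"]
  if PySem.Set.contains REJECTED_FILENAMES file_name then false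
  else
    (ACCEPTABLE_SUFFIXES.any (fun suffix => PySem.Str.endswith file_name suffix))
      || PySem.Set.contains ACCEPTABLE_FILENAMES file_name

-- ===== PORT B =====
-- hand port (exact) of the (sep, tail) components of file_name.rpartition(dot) as used by B:
-- scanning the reversed character list it returns `some tail` (tail in string order, the
-- characters after the LAST dot) when a dot exists, and `none` when sep is empty.
def rpartTailDot : List Char → Option (List Char)
  | [] => none
  | c :: cs => if c = '.' then some [] else (rpartTailDot cs).map (fun t => t ++ [c])

def is_acceptable_file_alt (file_name : String) : Bool :=
  let ACCEPTABLE_EXTENSIONS : PySem.Set (List Char) :=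
    PySem.Set.ofList
      [".py".toList, ".js".toList, ".java".toList, ".rb".toList, ".go".toList, ".rs".toList,
       ".json".toList, ".yaml".toList, ".yml".toList, ".xml".toList, ".md".toList, ".txt".toList,
       ".sh".toList, ".sql".toList, ".ts".toList, ".h".toList, ".c".toList, ".cpp".toList,
       ".hpp".toList, ".php".toList, ".jsx".toList, ".tsx".toList, ".swift".toList, ".kt".toList,
       ".cs".toList, ".out".toList]
  let ACCEPTABLE_FILENAMES : PySem.Set String := PySem.Set.ofList ["Makefile", "Dockerfile", ".env"]
  let REJECTED_FILENAMES : PySem.Set String := PySem.Set.ofList ["package-lock.json"]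
  if PySem.Set.contains REJECTED_FILENAMES file_name then false
  else
    (match rpartTailDot file_name.toList.reverse with
      | some tail => PySem.Set.contains ACCEPTABLE_EXTENSIONS ('.' :: tail)
      | none => false)
      || PySem.Set.contains ACCEPTABLE_FILENAMES file_name

-- ===== PRECONDITION & SPEC =====
def Spec_is_acceptable_file (file_name : String) (out : Bool) : Prop := out = is_acceptable_file_alt file_name
instance (file_name : String) (out : Bool) : Decidable (Spec_is_acceptable_file file_name out) := by unfold Spec_is_acceptable_file; infer_instance

-- ===== CLAIM (what is proved, stated in full; the proofs are below) =====
def Claim_equal_is_acceptable_file : Prop := ∀ (file_name : String), Dom_is_acceptable_file file_name → Spec_is_acceptable_file file_name (is_acceptable_file file_name)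

-- ===== LEMMAS AND PROOFS =====

-- rpartTailDot finds the segment after the LAST dot: for a dot-free X it returns `some X`
-- exactly on the (reversed) strings consisting of X.reverse, then a dot, then anything.
lemma rpartTailDot_some_iff (X : List Char) (hX : '.' ∉ X) :
    ∀ r : List Char, rpartTailDot r = some X ↔ ∃ u, r = X.reverse ++ '.' :: u := by
  induction X using List.reverseRecOn with
  | nil =>
    intro r
    cases r with
    | nil => simp [rpartTailDot]
    | cons c cs =>
      by_cases hc : c = '.'
      · subst hc; simp [rpartTailDot]
      · simp only [rpartTailDot, if_neg hc, Option.map_eq_some_iff, List.reverse_nil,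
          List.nil_append]
        constructor
        · rintro ⟨t, _, h⟩; exact absurd h (by simp)
        · rintro ⟨u, hu⟩
          injection hu with h1 _
          exact absurd h1 hc
  | append_singleton Y c ih =>
    have hc : c ≠ '.' := fun h => hX (h ▸ List.mem_append_right Y (List.mem_singleton.mpr rfl))
    have hY : '.' ∉ Y := fun h => hX (List.mem_append_left _ h)
    intro r
    cases r with
    | nil => simp [rpartTailDot]
    | cons d ds =>
      by_cases hd : d = '.'
      · subst hd
        simp only [rpartTailDot, List.reverse_append,
          List.reverse_singleton, List.singleton_append]
        constructor
        · intro h; exact absurd h.symm (by simp)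
        · rintro ⟨u, hu⟩
          injection hu with h1 _
          exact absurd h1.symm hc
      · simp only [rpartTailDot, if_neg hd, Option.map_eq_some_iff, List.reverse_append,
          List.reverse_singleton, List.singleton_append]
        constructor
        · rintro ⟨t, ht, h⟩
          have h1 : t = Y := by
            have := congrArg List.dropLast h; simpa using this
          have h2 : d = c := by
            have := congrArg List.getLast? h; simpa using this
          subst h1; subst h2
          obtain ⟨u, hu⟩ := (ih hY ds).mp ht
          exact ⟨u, by simp [hu]⟩
        · rintro ⟨u, hu⟩
          injection hu with h1 h2
          subst h1
          exact ⟨Y, (ih hY ds).mpr ⟨u, h2⟩, rfl⟩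

-- a filename ends with a dot-initial literal suffix (dot-free X after the dot) iff X is exactly its last-dot extension
lemma endswith_eq_rpart (s p : String) (X : List Char) (hp : p.toList = '.' :: X)
    (hX : '.' ∉ X) :
    PySem.Str.endswith s p = decide (rpartTailDot s.toList.reverse = some X) := by
  rw [Bool.eq_iff_iff]
  simp only [decide_eq_true_eq]
  rw [PySem.Str.endswith_eq, hp, PySem.Chars.endswith_iff, rpartTailDot_some_iff X hX]
  constructor
  · rintro ⟨t, ht⟩
    exact ⟨t.reverse, by rw [← ht]; simp⟩
  · rintro ⟨u, hu⟩
    refine ⟨u.reverse, ?_⟩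
    have := congrArg List.reverse hu
    simpa using this.symm

-- ===== VERDICT (by name: the statement is the Claim_ definition above) =====
theorem is_acceptable_file_spec : Claim_equal_is_acceptable_file := by
  intro file_name _
  unfold Spec_is_acceptable_file
  unfold is_acceptable_file is_acceptable_file_alt
  simp only [List.any_cons, List.any_nil]
  rw [endswith_eq_rpart file_name ".py" ['p','y'] (by decide) (by decide),
      endswith_eq_rpart file_name ".js" ['j','s'] (by decide) (by decide),
      endswith_eq_rpart file_name ".java" ['j','a','v','a'] (by decide) (by decide),
      endswith_eq_rpart file_name ".rb" ['r','b'] (by decide) (by decide),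
      endswith_eq_rpart file_name ".go" ['g','o'] (by decide) (by decide),
      endswith_eq_rpart file_name ".rs" ['r','s'] (by decide) (by decide),
      endswith_eq_rpart file_name ".json" ['j','s','o','n'] (by decide) (by decide),
      endswith_eq_rpart file_name ".yaml" ['y','a','m','l'] (by decide) (by decide),
      endswith_eq_rpart file_name ".yml" ['y','m','l'] (by decide) (by decide),
      endswith_eq_rpart file_name ".xml" ['x','m','l'] (by decide) (by decide),
      endswith_eq_rpart file_name ".md" ['m','d'] (by decide) (by decide),
      endswith_eq_rpart file_name ".txt" ['t','x','t'] (by decide) (by decide),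
      endswith_eq_rpart file_name ".sh" ['s','h'] (by decide) (by decide),
      endswith_eq_rpart file_name ".sql" ['s','q','l'] (by decide) (by decide),
      endswith_eq_rpart file_name ".ts" ['t','s'] (by decide) (by decide),
      endswith_eq_rpart file_name ".h" ['h'] (by decide) (by decide),
      endswith_eq_rpart file_name ".c" ['c'] (by decide) (by decide),
      endswith_eq_rpart file_name ".cpp" ['c','p','p'] (by decide) (by decide),
      endswith_eq_rpart file_name ".hpp" ['h','p','p'] (by decide) (by decide),
      endswith_eq_rpart file_name ".php" ['p','h','p'] (by decide) (by decide),
      endswith_eq_rpart file_name ".jsx" ['j','s','x'] (by decide) (by decide),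
      endswith_eq_rpart file_name ".tsx" ['t','s','x'] (by decide) (by decide),
      endswith_eq_rpart file_name ".swift" ['s','w','i','f','t'] (by decide) (by decide),
      endswith_eq_rpart file_name ".kt" ['k','t'] (by decide) (by decide),
      endswith_eq_rpart file_name ".cs" ['c','s'] (by decide) (by decide),
      endswith_eq_rpart file_name ".out" ['o','u','t'] (by decide) (by decide)]
  cases hv : rpartTailDot file_name.toList.reverse with
  | none => simp
  | some t => simp [PySem.Set.contains, PySem.Set.ofList, List.cons.injEq]
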